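-- pv_equiv track=rewrite | github.com/richonguzman/APRSPacketLib | tools/gen_aprs_vectors.py | c_string
-- ===== SOURCE A (Python) =====
-- def c_string(s: str) -> str:
--     """Quote a Python string as a valid C string literal. All our
--     inputs are printable 7-bit ASCII, so only `"` and `\\` need
--     escaping."""
--     out = ['"']
--     for ch in s:
--         if ch == '"':
--             out.append('\\"')
--         elif ch == '\\':
--             out.append('\\\\')
--         else:
--             out.append(ch)
--     out.append('"')
--     return "".join(out)
-- ===== SOURCE B (Python) =====
-- def c_string(s: str) -> str:
--     # Two whole-string substitution passes instead of a char-by-char loop: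
--     # backslashes are doubled first so escape-introduced backslashes are not re-doubled.
--     return '"' + s.replace('\\', '\\\\').replace('"', '\\"') + '"'
-- ===== Notes on version B (the rewrite author's own statement) =====
-- stated objective: idiomatic
-- what changed: Replaced the char-by-char branching accumulator loop with two whole-string replace passes (double backslashes first, then escape quotes) and string concatenation.
import Mathlib
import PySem

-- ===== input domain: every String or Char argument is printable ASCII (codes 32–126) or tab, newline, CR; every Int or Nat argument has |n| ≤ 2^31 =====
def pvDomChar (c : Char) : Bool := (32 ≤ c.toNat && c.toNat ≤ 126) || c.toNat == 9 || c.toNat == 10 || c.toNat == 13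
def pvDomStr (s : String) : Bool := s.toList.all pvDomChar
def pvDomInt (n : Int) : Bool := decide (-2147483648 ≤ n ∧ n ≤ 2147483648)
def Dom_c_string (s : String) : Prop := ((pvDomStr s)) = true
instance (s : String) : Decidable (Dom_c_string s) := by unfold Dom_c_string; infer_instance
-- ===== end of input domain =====

-- B replaces A's char-by-char branching accumulator loop by two whole-string
-- substitution passes (double backslashes first, then escape quotes); objective: idiomatic.

-- ===== PORT A =====
-- literal port of A: build a list of string pieces with a branching loop, then "".join
def c_string (s : String) : String :=
  let out : List String :=
    s.toList.foldl
      (fun (out : List String) ch =>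
        if ch = '"' then out ++ ["\\\""]
        else if ch = '\\' then out ++ ["\\\\"]
        else out ++ [String.ofList [ch]])
      ["\""]
  PySem.Str.join "" (out ++ ["\""])

-- ===== PORT B =====
-- literal port of B: '"' + s.replace('\\','\\\\').replace('"','\\"') + '"'
def c_string_alt (s : String) : String :=
  "\"" ++ PySem.Str.replace (PySem.Str.replace s "\\" "\\\\") "\"" "\\\"" ++ "\""

-- ===== PRECONDITION & SPEC =====
def Spec_c_string (s : String) (out : String) : Prop := out = c_string_alt s
instance (s : String) (out : String) : Decidable (Spec_c_string s out) := by unfold Spec_c_string; infer_instance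

-- ===== CLAIM (what is proved, stated in full; the proofs are below) =====
def Claim_equal_c_string : Prop := ∀ (s : String), Dom_c_string s → Spec_c_string s (c_string s)

-- ===== LEMMAS AND PROOFS =====

-- single-character replace is a flatMap over the characters
theorem replace_go_single (o : Char) (new : List Char) :
    ∀ (l acc : List Char),
      PySem.Chars.replace.go [o] new l.length l acc
        = acc.reverse ++ l.flatMap (fun c => if c = o then new else [c]) := by
  intro l
  induction l with
  | nil => intro acc; simp [PySem.Chars.replace.go]
  | cons c t ih =>
    intro acc
    simp only [List.length_cons, PySem.Chars.replace.go, List.isPrefixOf]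
    by_cases h : o = c
    · subst h
      simp [ih, List.flatMap_cons]
    · have hb : (o == c) = false := by simp [h]
      simp [hb, ih, List.flatMap_cons, Ne.symm h]

theorem replace_single (o : Char) (new cs : List Char) :
    PySem.Chars.replace cs [o] new
      = cs.flatMap (fun c => if c = o then new else [c]) := by
  have h := replace_go_single o new cs []
  simpa [PySem.Chars.replace] using h

theorem join_empty_eq_flatten (lss : List (List Char)) :
    PySem.Chars.join [] lss = lss.flatten := by
  induction lss with
  | nil => simp [PySem.Chars.join_nil]
  | cons a rest ih =>
    cases rest with
    | nil => simp [PySem.Chars.join_singleton]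
    | cons b r =>
      rw [PySem.Chars.join_cons_cons]
      simp [ih]

theorem foldl_append_map (g : Char → String) :
    ∀ (l : List Char) (init : List String),
      l.foldl (fun out ch => out ++ [g ch]) init = init ++ l.map g := by
  intro l
  induction l with
  | nil => intro init; simp
  | cons c t ih => intro init; simp [List.foldl_cons, ih]

-- the per-character pieces of the two pipelines coincide
theorem core_eq : ∀ (l : List Char),
    (l.map (fun ch => if ch = '"' then "\\\"" else if ch = '\\' then "\\\\" else String.ofList [ch])).flatMap String.toList
      = ((l.flatMap (fun c => if c = '\\' then ['\\','\\'] else [c])).flatMap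
          (fun c => if c = '"' then ['\\','"'] else [c])) := by
  intro l
  induction l with
  | nil => rfl
  | cons c t ih =>
    have e1 : ("\\\"" : String).toList = ['\\','"'] := rfl
    have e2 : ("\\\\" : String).toList = ['\\','\\'] := rfl
    by_cases h1 : c = '"' <;> by_cases h2 : c = '\\' <;>
      simp [h1, h2, ih, e1, e2, List.flatMap_cons]

-- ===== VERDICT (by name: the statement is the Claim_ definition above) =====
theorem c_string_spec : Claim_equal_c_string := by
  intro s _
  unfold Spec_c_string c_string c_string_alt
  apply String.ext
  have hfold :
      s.toList.foldl
        (fun (out : List String) ch =>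
          if ch = '"' then out ++ ["\\\""]
          else if ch = '\\' then out ++ ["\\\\"]
          else out ++ [String.ofList [ch]])
        ["\""]
      = ["\""] ++ s.toList.map
          (fun ch => if ch = '"' then "\\\"" else if ch = '\\' then "\\\\" else String.ofList [ch]) := by
    have := foldl_append_map
      (fun ch => if ch = '"' then "\\\"" else if ch = '\\' then "\\\\" else String.ofList [ch])
      s.toList ["\""]
    rw [← this]
    congr 1
    funext out ch
    by_cases h1 : ch = '"' <;> by_cases h2 : ch = '\\' <;> simp [h1, h2]
  simp only [hfold]
  have hA :
      (PySem.Str.join ""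
        ((["\""] ++ s.toList.map
            (fun ch => if ch = '"' then "\\\"" else if ch = '\\' then "\\\\" else String.ofList [ch]))
          ++ ["\""])).toList
      = '"' :: (s.toList.map
          (fun ch => if ch = '"' then "\\\"" else if ch = '\\' then "\\\\" else String.ofList [ch])).flatMap String.toList
        ++ ['"'] := by
    rw [PySem.Str.toList_join]
    rw [show ("" : String).toList = ([] : List Char) from rfl]
    rw [join_empty_eq_flatten]
    simp [List.flatten_eq_flatMap, List.flatMap_map]
  rw [hA]
  have hB :
      ("\"" ++ PySem.Str.replace (PySem.Str.replace s "\\" "\\\\") "\"" "\\\"" ++ "\"").toList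
      = '"' :: ((s.toList.flatMap (fun c => if c = '\\' then ['\\','\\'] else [c])).flatMap
          (fun c => if c = '"' then ['\\','"'] else [c])) ++ ['"'] := by
    simp only [String.toList_append, PySem.Str.toList_replace]
    rw [show ("\\" : String).toList = ['\\'] from rfl,
        show ("\\\\" : String).toList = ['\\','\\'] from rfl,
        show ("\"" : String).toList = ['"'] from rfl,
        show ("\\\"" : String).toList = ['\\','"'] from rfl]
    rw [replace_single, replace_single]
    rfl
  rw [hB, core_eq]
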